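-- pv_equiv track=rewrite | github.com/daisyleedq/FFR105_Stochastic-Optimization-Algorithms | FFR105_CODE/PYTHON/TSP/distinct_paths.py | paths_not_cycling_or_flipt_cycling
-- ===== SOURCE A (Python) =====
-- def paths_not_cycling_or_flipt_cycling(pathsStr):
--     tmpPathsStr = [pathsStr[0]]
--     pathsStr = pathsStr[1:]
--
--     while pathsStr:
--         t = pathsStr[0]
--         pathsStr = pathsStr[1:]
--         tt = t + t
--         isCycling = False
--         for tp in tmpPathsStr:
--             if tt.count(tp) != 0 or tt[::-1].count(tp) != 0:
--                 isCycling = True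
--         if not isCycling:
--             tmpPathsStr.append(t)
--
--     pathsStr = tmpPathsStr
--
--     return pathsStr
-- ===== SOURCE B (Python) =====
-- def paths_not_cycling_or_flipt_cycling(pathsStr):
--     # Sieve: keep the front survivor, filter everything it matches out of the
--     # remainder in one pass, repeat.  Discarded paths are never examined again.
--     out = []
--     rest = pathsStr
--     while rest:
--         h = rest[0]
--         out.append(h)
--         hr = h[::-1]
--         rest = [t for t in rest[1:] if h not in t + t and hr not in t + t]
--     return out
-- ===== Notes on version B (the rewrite author's own statement) =====
-- stated objective: faster
-- what changed: A keeps an accumulator and re-scans every kept path (computing a fresh reversed copy of t+t per pair and a full non-short-circuit count) for each remaining element; B is a sieve: it keeps the front survivor, filters all its rotation/reversed-rotation matches out of the remainder in one pass with short-circuit 'in' tests and one precomputed reversal per kept path, so discarded paths are never examined again.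
-- crash fix: On the empty list A raises IndexError (it reads pathsStr[0]); B returns []. — e.g. on paths_not_cycling_or_flipt_cycling([]): A raises IndexError, B returns []
import Mathlib
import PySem

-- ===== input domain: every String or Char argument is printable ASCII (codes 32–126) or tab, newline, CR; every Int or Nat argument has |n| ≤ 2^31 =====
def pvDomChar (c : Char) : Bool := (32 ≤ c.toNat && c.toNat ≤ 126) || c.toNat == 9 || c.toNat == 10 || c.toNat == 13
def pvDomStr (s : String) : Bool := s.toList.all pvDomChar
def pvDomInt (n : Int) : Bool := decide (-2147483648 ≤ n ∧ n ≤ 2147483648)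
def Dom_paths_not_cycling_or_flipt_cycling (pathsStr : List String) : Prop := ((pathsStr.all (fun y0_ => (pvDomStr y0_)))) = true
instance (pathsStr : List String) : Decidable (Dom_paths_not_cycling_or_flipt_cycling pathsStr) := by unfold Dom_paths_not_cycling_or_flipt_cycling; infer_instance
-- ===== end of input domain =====

-- B replaces A's accumulate-and-rescan-everything loop by a sieve that filters each kept
-- path's matches out of the remainder once, so discarded paths are never examined again.
-- Neither program mutates its argument.

-- ===== PORT A =====
-- Python `a + b` on str, via List Char (exact: concatenation of code points).
def pvStrAdd (a b : String) : String := String.ofList (a.toList ++ b.toList)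

-- Python `s[::-1]` (slice with step -1; the step is nonzero, so `.getD ""` is never used).
def pvStrRev (s : String) : String := (PySem.Str.slice? s none none (-1)).getD ""

-- A's `while pathsStr:` loop: tmp is tmpPathsStr, rest the remaining pathsStr.
def pncfcLoopA (tmp : List String) (rest : List String) : List String :=
  match rest with
  | [] => tmp
  | t :: rest' =>
      let tt := pvStrAdd t t
      let isCycling := tmp.foldl
        (fun b tp => if PySem.Str.count tt tp ≠ 0 ∨ PySem.Str.count (pvStrRev tt) tp ≠ 0 then true else b)
        false
      pncfcLoopA (if isCycling then tmp else tmp ++ [t]) rest'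

def paths_not_cycling_or_flipt_cycling (pathsStr : List String) : List String :=
  match PySem.List.pyGet? pathsStr 0 with
  | none => []  -- Python raises IndexError here (pathsStr = []); excluded by Pre_
  | some h => pncfcLoopA [h] (PySem.List.slice pathsStr (some 1) none)

-- ===== PORT B =====
-- one sieve test: `h in t + t or hr in t + t` with hr = h[::-1]
def pncfcCyc (h t : String) : Bool :=
  PySem.Str.isIn h (pvStrAdd t t) || PySem.Str.isIn (pvStrRev h) (pvStrAdd t t)

-- B's `while rest:` loop, structural on a fuel argument (exact: rest shrinks by at
-- least one element per round, so fuel = the initial length is never exhausted).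
def pncfcSieve (fuel : Nat) (out rest : List String) : List String :=
  match fuel, rest with
  | _, [] => out
  | 0, _ => out
  | Nat.succ f, h :: rs => pncfcSieve f (out ++ [h]) (rs.filter (fun t => !pncfcCyc h t))

def paths_not_cycling_or_flipt_cycling_alt (pathsStr : List String) : List String :=
  pncfcSieve pathsStr.length [] pathsStr

-- ===== PRECONDITION & SPEC =====
-- Pre_ excludes exactly the empty list, on which A raises IndexError (pathsStr[0]).
def Pre_paths_not_cycling_or_flipt_cycling (pathsStr : List String) : Prop := pathsStr ≠ []
instance (pathsStr : List String) : Decidable (Pre_paths_not_cycling_or_flipt_cycling pathsStr) := by unfold Pre_paths_not_cycling_or_flipt_cycling; infer_instance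

def pvWitness_paths_not_cycling_or_flipt_cycling : List String := ["ab", "ba", "cd"]

-- On the empty list A raises IndexError (it reads pathsStr[0]); B returns [].
def Raises_paths_not_cycling_or_flipt_cycling (pathsStr : List String) : Prop := pathsStr = []
instance (pathsStr : List String) : Decidable (Raises_paths_not_cycling_or_flipt_cycling pathsStr) := by unfold Raises_paths_not_cycling_or_flipt_cycling; infer_instance
def pvRaiseWitness_paths_not_cycling_or_flipt_cycling : List String := []
def pvRaiseWitnessOut_paths_not_cycling_or_flipt_cycling : List String := []

def Spec_paths_not_cycling_or_flipt_cycling (pathsStr : List String) (out : List String) : Prop := out = paths_not_cycling_or_flipt_cycling_alt pathsStr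
instance (pathsStr : List String) (out : List String) : Decidable (Spec_paths_not_cycling_or_flipt_cycling pathsStr out) := by unfold Spec_paths_not_cycling_or_flipt_cycling; infer_instance

-- ===== CLAIM (what is proved, stated in full; the proofs are below) =====
def Claim_equal_paths_not_cycling_or_flipt_cycling : Prop := ∀ (pathsStr : List String), Dom_paths_not_cycling_or_flipt_cycling pathsStr → Pre_paths_not_cycling_or_flipt_cycling pathsStr → Spec_paths_not_cycling_or_flipt_cycling pathsStr (paths_not_cycling_or_flipt_cycling pathsStr)

def Claim_raises_paths_not_cycling_or_flipt_cycling : Prop := (∀ (pathsStr : List String), Dom_paths_not_cycling_or_flipt_cycling pathsStr → Raises_paths_not_cycling_or_flipt_cycling pathsStr → ¬ Pre_paths_not_cycling_or_flipt_cycling pathsStr) ∧ (Dom_paths_not_cycling_or_flipt_cycling (pvRaiseWitness_paths_not_cycling_or_flipt_cycling) ∧ Raises_paths_not_cycling_or_flipt_cycling (pvRaiseWitness_paths_not_cycling_or_flipt_cycling) ∧ paths_not_cycling_or_flipt_cycling_alt (pvRaiseWitness_paths_not_cycling_or_flipt_cycling) = pvRaiseWitnessOut_paths_not_cycling_or_f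lipt_cycling)

-- ===== LEMMAS AND PROOFS =====

theorem pvStrRev_toList (s : String) : (pvStrRev s).toList = s.toList.reverse := by
  simp [pvStrRev, PySem.Str.slice?_none_none_neg_one]

theorem pvStrAdd_toList (a b : String) : (pvStrAdd a b).toList = a.toList ++ b.toList := by
  simp [pvStrAdd]

-- count.go never decreases the accumulator
theorem pncfc_go_le (sub : List Char) (fuel : Nat) (l : List Char) (acc : Nat) :
    acc ≤ PySem.Chars.count.go sub fuel l acc := by
  induction fuel generalizing l acc with
  | zero => simp [PySem.Chars.count.go]
  | succ n ih =>
      cases l with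
      | nil => simp [PySem.Chars.count.go]
      | cons h t =>
          rw [PySem.Chars.count.go]
          split
          · exact le_trans (Nat.le_succ acc) (ih _ _)
          · exact ih _ _

-- count.go leaves the accumulator unchanged exactly when sub never occurs
theorem pncfc_go_eq_iff (sub : List Char) (hsub : sub ≠ []) (fuel : Nat) (l : List Char) (acc : Nat)
    (hf : l.length ≤ fuel) :
    PySem.Chars.count.go sub fuel l acc = acc ↔ ¬ sub <:+: l := by
  induction fuel generalizing l acc with
  | zero =>
      have : l = [] := List.length_eq_zero_iff.mp (Nat.le_zero.mp hf)
      subst this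
      simp [PySem.Chars.count.go, List.infix_nil, hsub]
  | succ n ih =>
      cases l with
      | nil => simp [PySem.Chars.count.go, List.infix_nil, hsub]
      | cons h t =>
          rw [PySem.Chars.count.go]
          split
          · rename_i hpre
            have hp : sub <+: h :: t := List.isPrefixOf_iff_prefix.mp hpre
            constructor
            · intro heq
              have := pncfc_go_le sub n (List.drop sub.length (h :: t)) (acc + 1)
              omega
            · intro hni; exact absurd hp.isInfix hni
          · rename_i hpre
            rw [ih t acc (by simpa using Nat.le_of_succ_le_succ (by simpa using hf))]
            rw [List.infix_cons_iff]
            simp [List.isPrefixOf_iff_prefix] at hpre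
            simp [hpre]

-- Python `s.count(sub) != 0` is exactly `sub in s`
theorem pncfc_count_ne_zero_iff (s sub : List Char) :
    PySem.Chars.count s sub ≠ 0 ↔ sub <:+: s := by
  unfold PySem.Chars.count
  by_cases h : sub = []
  · simp [h]
  · simp only [List.isEmpty_iff, h, if_false]
    have hiff := pncfc_go_eq_iff sub h s.length s 0 le_rfl
    constructor
    · intro hpos
      by_contra hni
      exact hpos (hiff.mpr hni)
    · intro hi hz
      exact (hiff.mp hz) hi

-- A's inner test on (tp, t) equals B's sieve test pncfcCyc tp t
theorem pncfc_cond_eq (tp t : String) :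
    (decide (PySem.Str.count (pvStrAdd t t) tp ≠ 0 ∨
             PySem.Str.count (pvStrRev (pvStrAdd t t)) tp ≠ 0)) = pncfcCyc tp t := by
  rw [Bool.eq_iff_iff]
  simp only [decide_eq_true_eq, pncfcCyc, Bool.or_eq_true,
    PySem.Str.count_eq, PySem.Str.isIn_iff_infix,
    pvStrRev_toList, pvStrAdd_toList, pncfc_count_ne_zero_iff]
  constructor
  · rintro (h | h)
    · exact Or.inl h
    · exact Or.inr (by simpa using (List.reverse_infix (l₁ := tp.toList)
        (l₂ := (t.toList ++ t.toList).reverse)).mpr h)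
  · rintro (h | h)
    · exact Or.inl h
    · exact Or.inr (by simpa using (List.reverse_infix (l₁ := tp.toList)
        (l₂ := (t.toList ++ t.toList).reverse)).mp (by simpa using h))

-- A's flag-setting fold is an `any`
theorem pncfc_foldl_flag (l : List String) (P : String → Prop) [DecidablePred P] (b : Bool) :
    l.foldl (fun b tp => if P tp then true else b) b = (b || l.any (fun tp => decide (P tp))) := by
  induction l generalizing b with
  | nil => simp
  | cons x xs ih =>
      simp only [List.foldl_cons, List.any_cons, ih]
      by_cases h : P x <;> cases b <;> simp [h]

theorem pncfc_loopA_step (tmp rest' : List String) (t : String) :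
    pncfcLoopA tmp (t :: rest') =
      pncfcLoopA (if tmp.any (fun tp => pncfcCyc tp t) then tmp else tmp ++ [t]) rest' := by
  show pncfcLoopA
      (if tmp.foldl (fun b tp => if PySem.Str.count (pvStrAdd t t) tp ≠ 0 ∨
          PySem.Str.count (pvStrRev (pvStrAdd t t)) tp ≠ 0 then true else b) false
        then tmp else tmp ++ [t]) rest' = _
  congr 2
  rw [pncfc_foldl_flag tmp (fun tp => PySem.Str.count (pvStrAdd t t) tp ≠ 0 ∨
        PySem.Str.count (pvStrRev (pvStrAdd t t)) tp ≠ 0)]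
  simp only [pncfc_cond_eq, Bool.false_or]

-- accumulate-and-test equals the sieve on the pre-filtered remainder
theorem pncfc_loopA_eq_sieve (rest : List String) (fuel : Nat) (tmp : List String)
    (hf : rest.length ≤ fuel) :
    pncfcLoopA tmp rest =
      pncfcSieve fuel tmp (rest.filter (fun t => !(tmp.any (fun tp => pncfcCyc tp t)))) := by
  induction rest generalizing fuel tmp with
  | nil => cases fuel <;> simp [pncfcLoopA, pncfcSieve]
  | cons t rs ih =>
      cases fuel with
      | zero => simp at hf
      | succ f =>
          rw [pncfc_loopA_step]
          by_cases hc : tmp.any (fun tp => pncfcCyc tp t) = true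
          · rw [if_pos hc]
            rw [List.filter_cons_of_neg (by simp [hc])]
            exact ih (f + 1) tmp (by simp at hf ⊢; omega)
          · rw [if_neg hc]
            rw [List.filter_cons_of_pos (by simp [Bool.not_eq_true] at hc ⊢; exact hc)]
            rw [ih f (tmp ++ [t]) (by simp at hf ⊢; omega)]
            show _ = pncfcSieve f (tmp ++ [t]) _
            congr 1
            rw [List.filter_filter]
            apply List.filter_congr
            intro y _
            simp only [List.any_append, List.any_cons, List.any_nil]
            cases htmp : tmp.any (fun tp => pncfcCyc tp y) <;> cases hcy : pncfcCyc t y <;> simp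

theorem paths_not_cycling_or_flipt_cycling_spec : Claim_equal_paths_not_cycling_or_flipt_cycling := by
  intro pathsStr _ hpre
  unfold Spec_paths_not_cycling_or_flipt_cycling
  match pathsStr with
  | [] => exact absurd rfl hpre
  | h :: rest =>
      show paths_not_cycling_or_flipt_cycling (h :: rest) =
        paths_not_cycling_or_flipt_cycling_alt (h :: rest)
      unfold paths_not_cycling_or_flipt_cycling paths_not_cycling_or_flipt_cycling_alt
      rw [PySem.List.slice_from_one]
      have h0 : PySem.List.pyGet? (h :: rest) 0 = some h := by
        simp [PySem.List.pyGet?, PySem.List.pyIdx?]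
      rw [h0]
      show pncfcLoopA [h] rest = pncfcSieve (rest.length + 1) [] (h :: rest)
      show pncfcLoopA [h] rest =
        pncfcSieve rest.length [h] (rest.filter (fun t => !pncfcCyc h t))
      rw [pncfc_loopA_eq_sieve rest rest.length [h] le_rfl]
      congr 1
      apply List.filter_congr
      intro y _
      simp

@[simp] theorem paths_not_cycling_or_flipt_cycling_raises : Claim_raises_paths_not_cycling_or_flipt_cycling := by
  unfold Claim_raises_paths_not_cycling_or_flipt_cycling
  refine ⟨fun p _ hr => ?_, by decide⟩
  simp [Raises_paths_not_cycling_or_flipt_cycling] at hr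
  simp [Pre_paths_not_cycling_or_flipt_cycling, hr]
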